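-- pv_equiv track=rewrite | github.com/adamnpeace/logic-satisfiability-checker | satisfiability_checker.py | findBC
-- ===== SOURCE A (Python) =====
-- def findBC(formula):
--     if formula[0] == '-':
--         return findBC(formula[1:]) + 1
--     if formula[0] == '(':
--         braces = -1
--         for i in range(len(formula)):
--             if formula[i] == '(':
--                 braces += 1
--             if formula[i] == ')':
--                 braces -= 1
--             if formula[i] == '>' or formula[i] == '^' or formula[i] == 'v':
--                 if braces == 0:
--                     return i
--     return 0
-- ===== SOURCE B (Python) =====
-- def findBC(formula):
--     k = 0
--     while formula[k] == '-':
--         k += 1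
--     if formula[k] != '(':
--         return k
--     braces = 0
--     for i in range(k, len(formula)):
--         c = formula[i]
--         if c == '(':
--             braces += 1
--         elif c == ')':
--             braces -= 1
--         elif (c == '>' or c == '^' or c == 'v') and braces == 1:
--             return i
--     return k
-- ===== Notes on version B (the rewrite author's own statement) =====
-- stated objective: alternative
-- what changed: Replaces A's recursion on leading '-' (with relative indices and a braces counter started at -1) by an iterative dash-skip followed by a single absolute-index scan with braces started at 0 and an if/elif chain.
import Mathlib
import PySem

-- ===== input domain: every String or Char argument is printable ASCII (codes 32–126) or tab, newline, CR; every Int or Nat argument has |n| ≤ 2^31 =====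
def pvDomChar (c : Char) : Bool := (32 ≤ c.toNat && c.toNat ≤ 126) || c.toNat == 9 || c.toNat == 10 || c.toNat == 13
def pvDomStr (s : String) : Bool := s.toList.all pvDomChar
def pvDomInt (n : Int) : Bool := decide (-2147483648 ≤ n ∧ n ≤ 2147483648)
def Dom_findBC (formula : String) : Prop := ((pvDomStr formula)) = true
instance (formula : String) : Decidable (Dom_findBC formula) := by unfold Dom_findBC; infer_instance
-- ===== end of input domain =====

-- B replaces A's recursion on leading dashes by an iterative skip + one absolute-index scan; same results everywhere A returns.

-- ===== PORT A =====
-- A's for-loop over range(len(formula)): chars still to scan, current braces, current index; 'some i' = early return i, 'none' = loop fell through.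
def findBCA_scan : List Char → Int → Int → Option Int
  | [], _, _ => none
  | c :: rest, braces, i =>
    let braces := if c = '(' then braces + 1 else braces
    let braces := if c = ')' then braces - 1 else braces
    if (c = '>' ∨ c = '^' ∨ c = 'v') ∧ braces = 0 then some i
    else findBCA_scan rest braces (i + 1)

-- A itself; 'none' = IndexError from formula[0] on the empty string (reached when the input is all dashes).
def findBCA : List Char → Option Int
  | [] => none
  | c :: rest =>
    if c = '-' then (findBCA rest).map (· + 1)
    else if c = '(' then
      match findBCA_scan (c :: rest) (-1) 0 with
      | some i => some i
      | none => some 0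
    else some 0

def findBC (formula : String) : Int := (findBCA formula.toList).getD 0

-- ===== PORT B =====
-- B's while loop: count of leading dashes.
def findBCB_dashes : List Char → Nat
  | [] => 0
  | c :: rest => if c = '-' then findBCB_dashes rest + 1 else 0

-- B's for-loop from position k: braces starts at 0, absolute index i.
def findBCB_scan : List Char → Int → Int → Option Int
  | [], _, _ => none
  | c :: rest, braces, i =>
    if c = '(' then findBCB_scan rest (braces + 1) (i + 1)
    else if c = ')' then findBCB_scan rest (braces - 1) (i + 1)
    else if (c = '>' ∨ c = '^' ∨ c = 'v') ∧ braces = 1 then some i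
    else findBCB_scan rest braces (i + 1)

def findBC_alt (formula : String) : Int :=
  let cs := formula.toList
  let k := findBCB_dashes cs
  match cs.drop k with
  | [] => 0  -- B's Python raises IndexError here (all-dash/empty input); outside Pre_findBC
  | c :: rs =>
    if c = '(' then (findBCB_scan (c :: rs) 0 (k : Int)).getD (k : Int)
    else (k : Int)

-- ===== PRECONDITION & SPEC =====
-- Pre_ excludes exactly the inputs where A raises IndexError: the empty string and all-dash strings.
def Pre_findBC (formula : String) : Prop := formula.toList.any (fun c => !(c == '-')) = true
instance (formula : String) : Decidable (Pre_findBC formula) := by unfold Pre_findBC; infer_instance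
def pvWitness_findBC : String := "p"

def Spec_findBC (formula : String) (out : Int) : Prop := out = findBC_alt formula
instance (formula : String) (out : Int) : Decidable (Spec_findBC formula out) := by unfold Spec_findBC; infer_instance

-- ===== CLAIM (what is proved, stated in full; the proofs are below) =====
def Claim_equal_findBC : Prop := ∀ (formula : String), Dom_findBC formula → Pre_findBC formula → Spec_findBC formula (findBC formula)

-- ===== LEMMAS AND PROOFS =====

-- B's scan is A's scan shifted: braces by +1, index by +d.
theorem scan_shift (l : List Char) : ∀ (b i d : Int),
    findBCB_scan l (b + 1) (i + d) = (findBCA_scan l b i).map (· + d) := by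
  induction l with
  | nil => intro b i d; simp [findBCA_scan, findBCB_scan]
  | cons c rest ih =>
    intro b i d
    simp only [findBCA_scan, findBCB_scan]
    by_cases hp : c = '('
    · have h1 : ¬ c = ')' := by subst hp; decide
      have h2 : (c = '>' ∨ c = '^' ∨ c = 'v') = False := by subst hp; decide
      simp only [if_pos hp, if_neg h1, h2, false_and, if_false]
      rw [show i + d + 1 = (i + 1) + d by ring]
      exact ih (b + 1) (i + 1) d
    · by_cases hq : c = ')'
      · have h2 : (c = '>' ∨ c = '^' ∨ c = 'v') = False := by subst hq; decide
        simp only [if_neg hp, if_pos hq, h2, false_and, if_false]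
        rw [show i + d + 1 = (i + 1) + d by ring, show b + 1 - 1 = (b - 1) + 1 by ring]
        exact ih (b - 1) (i + 1) d
      · by_cases hv : (c = '>' ∨ c = '^' ∨ c = 'v')
        · simp only [if_neg hp, if_neg hq, eq_true hv, true_and]
          by_cases hb : b = 0
          · subst hb; norm_num
          · have hb1 : ¬ ((0:Int) + 1 = 1) → False := fun h => h rfl
            rw [if_neg (show ¬ b + 1 = 1 by omega), if_neg hb]
            rw [show i + d + 1 = (i + 1) + d by ring]
            exact ih b (i + 1) d
        · have h2 : (c = '>' ∨ c = '^' ∨ c = 'v') = False := eq_false hv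
          simp only [if_neg hp, if_neg hq, h2, false_and, if_false]
          rw [show i + d + 1 = (i + 1) + d by ring]
          exact ih b (i + 1) d

-- Peeling the leading dashes adds their count to A's result.
theorem dash_peel (cs : List Char) :
    findBCA cs = (findBCA (cs.drop (findBCB_dashes cs))).map (· + (findBCB_dashes cs : Int)) := by
  induction cs with
  | nil => simp [findBCA, findBCB_dashes]
  | cons c rest ih =>
    by_cases h : c = '-'
    · subst h
      rw [show findBCB_dashes ('-' :: rest) = findBCB_dashes rest + 1 from by simp [findBCB_dashes]]
      rw [List.drop_succ_cons]
      rw [show findBCA ('-' :: rest) = (findBCA rest).map (· + 1) from by simp [findBCA]]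
      rw [ih]
      cases findBCA (rest.drop (findBCB_dashes rest)) with
      | none => simp
      | some a => simp only [Option.map_some]; congr 1; push_cast; ring
    · simp only [findBCB_dashes, if_neg h, List.drop_zero, Nat.cast_zero]
      cases findBCA (c :: rest) <;> simp

-- After dropping the counted dashes, a nonempty remainder never starts with '-'.
theorem drop_head_ne_dash (cs : List Char) :
    ∀ c rs, cs.drop (findBCB_dashes cs) = c :: rs → c ≠ '-' := by
  induction cs with
  | nil => intro c rs h; simp at h
  | cons a rest ih =>
    intro c rs h
    by_cases ha : a = '-'
    · simp only [findBCB_dashes, if_pos ha, List.drop_succ_cons] at h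
      exact ih c rs h
    · simp only [findBCB_dashes, if_neg ha, List.drop_zero] at h
      cases h; exact ha

-- Under Pre_, the remainder after the dashes is nonempty.
theorem drop_ne_nil (cs : List Char) (h : ∃ c ∈ cs, c ≠ '-') :
    cs.drop (findBCB_dashes cs) ≠ [] := by
  induction cs with
  | nil => obtain ⟨c, hc, _⟩ := h; simp at hc
  | cons a rest ih =>
    by_cases ha : a = '-'
    · simp only [findBCB_dashes, if_pos ha, List.drop_succ_cons]
      apply ih
      obtain ⟨c, hc, hne⟩ := h
      rcases List.mem_cons.mp hc with h1 | h1
      · exact absurd (h1.trans ha) hne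
      · exact ⟨c, h1, hne⟩
    · simp [findBCB_dashes, if_neg ha]

-- ===== VERDICT (by name: the statement is the Claim_ definition above) =====
theorem findBC_spec : Claim_equal_findBC := by
  intro formula _ hpre
  have hpre' : ∃ c ∈ formula.toList, c ≠ '-' := by
    simpa [Pre_findBC, List.any_eq_true] using hpre
  unfold Spec_findBC findBC findBC_alt
  show (findBCA formula.toList).getD 0 =
    match List.drop (findBCB_dashes formula.toList) formula.toList with
    | [] => (0 : Int)
    | c :: rs =>
      if c = '(' then
        (findBCB_scan (c :: rs) 0 ((findBCB_dashes formula.toList : Int))).getD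
          ((findBCB_dashes formula.toList : Int))
      else ((findBCB_dashes formula.toList : Int))
  have hdrop := drop_ne_nil formula.toList hpre'
  have hpeel := dash_peel formula.toList
  rcases hrest : formula.toList.drop (findBCB_dashes formula.toList) with _ | ⟨c, rs⟩
  · exact absurd hrest hdrop
  have hcne : c ≠ '-' := drop_head_ne_dash formula.toList c rs hrest
  rw [hrest] at hpeel
  show (findBCA formula.toList).getD 0 =
    if c = '(' then
      (findBCB_scan (c :: rs) 0 ((findBCB_dashes formula.toList : Int))).getD
        ((findBCB_dashes formula.toList : Int))
    else ((findBCB_dashes formula.toList : Int))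
  by_cases hcp : c = '('
  · rw [if_pos hcp]
    simp only [findBCA, if_neg hcne, if_pos hcp] at hpeel
    have hs := scan_shift (c :: rs) (-1) 0 ((findBCB_dashes formula.toList : Int))
    norm_num at hs
    cases hscan : findBCA_scan (c :: rs) (-1) 0 with
    | none =>
      rw [hscan] at hpeel hs
      rw [hpeel, hs]
      simp
    | some i =>
      rw [hscan] at hpeel hs
      rw [hpeel, hs]
      simp
  · rw [if_neg hcp]
    simp only [findBCA, if_neg hcne, if_neg hcp] at hpeel
    rw [hpeel]
    simp
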